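-- pv_equiv track=rewrite | github.com/ripl/maps | maps/helpers/data.py | limit_num_transitions
-- ===== SOURCE A (Python) =====
-- import itertools
-- from copy import deepcopy
-- from typing import Any, Callable, Iterable, List, Optional, Sequence
--
-- def flatten(array: Sequence[Iterable]):
--     return list(itertools.chain.from_iterable(array))
--
-- def limit_num_transitions(episodes: List[List[dict]], max_transitions: int):
--     """
--     Truncate the episodes so that the number of total transitions is capped by `max_transitions`.
--
--     Args:
--         - episodes: list of episodes
--     """
--     assert isinstance(episodes, list) and isinstance(episodes[0], list), isinstance(episodes[0][0], dict)
--
--     num_trans = 0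
--     cutoff_ep_idx, num_overrun = None, 0
--     for idx, episode in enumerate(reversed(episodes)):
--         # Keep track of the number of total transitions so far
--         num_trans += len(episode)
--         if num_trans >= max_transitions:
--             # Compute number of overrun steps and which episode it reached `max_transitions`
--             num_overrun = num_trans - max_transitions
--             cutoff_ep_idx = idx
--             break
--
--     # Return as is if there's no need to truncate the episodes
--     if cutoff_ep_idx is None or num_overrun is None:
--         return episodes
--
--     new_episodes = episodes[-cutoff_ep_idx-1:]  # Remove remaining old episodes
--     new_episodes2 = deepcopy(new_episodes)
--     new_episodes2[0] = new_episodes[0][num_overrun:]  # Remove old trajectories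
--
--     _num_transitions = len(flatten(new_episodes2))
--     assert _num_transitions <= max_transitions
--     return new_episodes2
-- ===== SOURCE B (Python) =====
-- from copy import deepcopy
-- from typing import List
--
--
-- def limit_num_transitions(episodes: List[List[dict]], max_transitions: int):
--     """
--     Truncate the episodes so that the number of total transitions is capped by `max_transitions`.
--
--     Args:
--         - episodes: list of episodes
--     """
--     assert isinstance(episodes, list) and isinstance(episodes[0], list), isinstance(episodes[0][0], dict)
--
--     total = sum(len(ep) for ep in episodes)
--     if total < max_transitions:
--         # Nothing to truncate
--         return episodes
--
--     # Walk from the front, dropping whole episodes while the remaining suffix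
--     # (without the current episode) still holds at least `max_transitions` transitions.
--     i, remaining = 0, total
--     while i < len(episodes) - 1 and remaining - len(episodes[i]) >= max_transitions:
--         remaining -= len(episodes[i])
--         i += 1
--
--     # Trim the boundary episode from the front so exactly max_transitions remain.
--     head = episodes[i][remaining - max_transitions:]
--     return [head] + deepcopy(episodes[i + 1:])
-- ===== Notes on version B (the rewrite author's own statement) =====
-- stated objective: alternative
-- what changed: Replaces A's reverse-enumerate scan with cumulative counter, Option cutoff index and negative-index slicing by a precomputed total plus a forward drop-whole-episodes walk that lands directly on the boundary episode and trims it, with no reversal and no negative indexing.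
import Mathlib
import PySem

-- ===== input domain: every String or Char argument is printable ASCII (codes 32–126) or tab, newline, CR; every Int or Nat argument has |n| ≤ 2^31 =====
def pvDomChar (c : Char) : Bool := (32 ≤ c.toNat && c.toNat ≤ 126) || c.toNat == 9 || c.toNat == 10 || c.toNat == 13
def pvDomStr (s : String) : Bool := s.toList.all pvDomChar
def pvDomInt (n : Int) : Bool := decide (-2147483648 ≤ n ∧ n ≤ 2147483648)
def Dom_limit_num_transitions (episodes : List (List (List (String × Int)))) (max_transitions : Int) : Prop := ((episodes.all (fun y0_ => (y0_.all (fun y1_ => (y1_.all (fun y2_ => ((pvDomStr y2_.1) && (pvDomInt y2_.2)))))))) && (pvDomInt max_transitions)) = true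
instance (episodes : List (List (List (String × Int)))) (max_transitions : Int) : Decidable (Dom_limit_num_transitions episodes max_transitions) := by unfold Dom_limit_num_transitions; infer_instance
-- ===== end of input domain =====

-- B replaces A's reverse-enumerate scan (cumulative counter + Option cutoff index + negative-index
-- slicing) by a precomputed total and a forward drop-whole-episodes walk; return values are equal
-- (Python's deepcopy/aliasing of dicts is not modelled — the equivalence is about the returned value).


-- ===== PORT A =====
-- A's `for idx, episode in enumerate(reversed(episodes))` loop with break:
-- accumulates num_trans and returns (cutoff_ep_idx, num_overrun) at the first reversed
-- episode whose cumulative count reaches max_transitions, None if the loop finishes.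
def pvA_loop (eps : List (List (List (String × Int)))) (idx : Nat) (num_trans : Int)
    (max_transitions : Int) : Option (Nat × Int) :=
  match eps with
  | [] => none
  | episode :: rest =>
    let n := num_trans + (episode.length : Int)
    if max_transitions ≤ n then some (idx, n - max_transitions)
    else pvA_loop rest (idx + 1) n max_transitions

-- deepcopy is the identity at value level; both asserts of A hold on Pre_ and are omitted.
def limit_num_transitions (episodes : List (List (List (String × Int)))) (max_transitions : Int) : List (List (List (String × Int))) :=
  match pvA_loop episodes.reverse 0 0 max_transitions with
  | none => episodes                                      -- cutoff_ep_idx is None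
  | some (cutoff_ep_idx, num_overrun) =>
    -- new_episodes = episodes[-cutoff_ep_idx-1:]; new_episodes2[0] = new_episodes[0][num_overrun:]
    match PySem.List.slice episodes (some (-(cutoff_ep_idx : Int) - 1)) none with
    | [] => []                                            -- unreachable: the slice is nonempty
    | e0 :: rest => PySem.List.slice e0 (some num_overrun) none :: rest

-- ===== PORT B =====
-- B's forward `while` walk: drop whole episodes while the suffix after the current one
-- still holds ≥ max_transitions transitions; `remaining` is B's running total - dropped.
def pvB_drop (eps : List (List (List (String × Int)))) (remaining : Int)
    (max_transitions : Int) : List (List (List (String × Int))) :=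
  match eps with
  | [] => []                                              -- unreachable: episodes ≠ []
  | [ep] => [PySem.List.slice ep (some (remaining - max_transitions)) none]
  | ep :: e1 :: rest =>
    if max_transitions ≤ remaining - (ep.length : Int) then
      pvB_drop (e1 :: rest) (remaining - (ep.length : Int)) max_transitions
    else
      PySem.List.slice ep (some (remaining - max_transitions)) none :: e1 :: rest

def limit_num_transitions_alt (episodes : List (List (List (String × Int)))) (max_transitions : Int) : List (List (List (String × Int))) :=
  let total := (episodes.map (fun ep => (ep.length : Int))).sum
  if total < max_transitions then episodes
  else pvB_drop episodes total max_transitions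

-- ===== PRECONDITION & SPEC =====
-- Pre_ excludes exactly the inputs on which Python A raises: episodes = [] (IndexError in the
-- first assert) and max_transitions < 0 (the final assert fails, since the truncated list is
-- emptied past the negative cap).
def Pre_limit_num_transitions (episodes : List (List (List (String × Int)))) (max_transitions : Int) : Prop :=
  episodes ≠ [] ∧ 0 ≤ max_transitions
instance (episodes : List (List (List (String × Int)))) (max_transitions : Int) : Decidable (Pre_limit_num_transitions episodes max_transitions) := by unfold Pre_limit_num_transitions; infer_instance

def pvWitness_limit_num_transitions : (List (List (List (String × Int)))) × Int :=
  ([[[("a", 1)], [("a", 2)]], [[("b", 3)]]], 2)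

def Spec_limit_num_transitions (episodes : List (List (List (String × Int)))) (max_transitions : Int) (out : List (List (List (String × Int)))) : Prop := out = limit_num_transitions_alt episodes max_transitions
instance (episodes : List (List (List (String × Int)))) (max_transitions : Int) (out : List (List (List (String × Int)))) : Decidable (Spec_limit_num_transitions episodes max_transitions out) := by unfold Spec_limit_num_transitions; infer_instance

-- ===== CLAIM (what is proved, stated in full; the proofs are below) =====
def Claim_equal_limit_num_transitions : Prop := ∀ (episodes : List (List (List (String × Int)))) (max_transitions : Int), Dom_limit_num_transitions episodes max_transitions → Pre_limit_num_transitions episodes max_transitions → Spec_limit_num_transitions episodes max_transitions (limit_num_transitions episodes max_transitions)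

-- ===== LEMMAS AND PROOFS =====

def pvSum (l : List (List (List (String × Int)))) : Int := (l.map (fun ep => (ep.length : Int))).sum

lemma pvSum_nonneg (l : List (List (List (String × Int)))) : 0 ≤ pvSum l := by
  induction l with
  | nil => simp [pvSum]
  | cons e t ih => simp only [pvSum, List.map_cons, List.sum_cons] at *; positivity

lemma pvSum_cons (e : List (List (String × Int))) (t : List (List (List (String × Int)))) :
    pvSum (e :: t) = (e.length : Int) + pvSum t := by simp [pvSum]

lemma pvSum_reverse (l : List (List (List (String × Int)))) : pvSum l.reverse = pvSum l := by
  simp [pvSum]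

lemma loop_none (xs : List (List (List (String × Int)))) :
    ∀ (idx : Nat) (nt m : Int), nt + pvSum xs < m → pvA_loop xs idx nt m = none := by
  induction xs with
  | nil => intro idx nt m _; rfl
  | cons e t ih =>
    intro idx nt m h
    rw [pvSum_cons] at h
    have ht := pvSum_nonneg t
    have hlt : ¬ m ≤ nt + (e.length : Int) := by omega
    simp only [pvA_loop, hlt, if_false]
    exact ih _ _ _ (by omega)

lemma loop_some (xs : List (List (List (String × Int)))) :
    ∀ (idx : Nat) (nt m : Int), xs ≠ [] → m ≤ nt + pvSum xs →
      ∃ i ov, pvA_loop xs idx nt m = some (i, ov) ∧ i < idx + xs.length := by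
  induction xs with
  | nil => intro _ _ _ h; exact absurd rfl h
  | cons e t ih =>
    intro idx nt m _ h
    rw [pvSum_cons] at h
    by_cases hc : m ≤ nt + (e.length : Int)
    · exact ⟨idx, nt + (e.length : Int) - m, by simp [pvA_loop, hc], by simp⟩
    · have ht : t ≠ [] := by
        rintro rfl; simp [pvSum] at h; omega
      obtain ⟨i, ov, hl, hb⟩ := ih (idx + 1) (nt + (e.length : Int)) m ht (by omega)
      exact ⟨i, ov, by simp only [pvA_loop, hc, if_false]; exact hl, by simp at hb ⊢; omega⟩

lemma loop_append (xs ys : List (List (List (String × Int)))) :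
    ∀ (idx : Nat) (nt m : Int), pvA_loop (xs ++ ys) idx nt m =
      match pvA_loop xs idx nt m with
      | some r => some r
      | none => pvA_loop ys (idx + xs.length) (nt + pvSum xs) m := by
  induction xs with
  | nil => intro idx nt m; simp [pvA_loop, pvSum]
  | cons e t ih =>
    intro idx nt m
    by_cases hc : m ≤ nt + (e.length : Int)
    · simp [pvA_loop, hc]
    · simp only [List.cons_append, pvA_loop, hc, if_false, ih, pvSum_cons, List.length_cons]
      have : idx + 1 + t.length = idx + (t.length + 1) := by omega
      have h2 : nt + (e.length : Int) + pvSum t = nt + ((e.length : Int) + pvSum t) := by ring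
      rw [this, h2]

lemma slice_neg_succ (l : List (List (List (String × Int)))) (i : Nat) :
    PySem.List.slice l (some (-(i : Int) - 1)) none = l.drop (l.length - (i + 1)) := by
  have h : (-(i : Int) - 1) = -((i + 1 : Nat) : Int) := by push_cast; ring
  rw [h, PySem.List.slice_from_neg_natCast _ _ (by omega)]

-- the truncation case: once the total reaches the cap, A's match equals B's forward walk
lemma key (l : List (List (List (String × Int)))) :
    ∀ (m : Int), l ≠ [] → m ≤ pvSum l →
      (match pvA_loop l.reverse 0 0 m with
       | none => l
       | some (cutoff_ep_idx, num_overrun) =>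
         match PySem.List.slice l (some (-(cutoff_ep_idx : Int) - 1)) none with
         | [] => []
         | e0 :: rest => PySem.List.slice e0 (some num_overrun) none :: rest)
      = pvB_drop l (pvSum l) m := by
  induction l with
  | nil => intro m h; exact absurd rfl h
  | cons e t ih =>
    intro m _ hm
    match t with
    | [] =>
      have hc : m ≤ ((e.length : Int)) := by
        rw [pvSum_cons] at hm; simp [pvSum] at hm; omega
      simp [pvA_loop, hc, PySem.List.slice_from_neg_one, pvB_drop, pvSum]
    | e1 :: t' =>
      have hrev : (e :: e1 :: t').reverse = (e1 :: t').reverse ++ [e] := by simp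
      rw [hrev, loop_append]
      by_cases hc : m ≤ pvSum (e1 :: t')
      · -- cutoff found inside the tail: A ignores e, B drops e
        obtain ⟨i, ov, hl, hb⟩ := loop_some (e1 :: t').reverse 0 0 m (by simp)
          (by rw [pvSum_reverse]; omega)
        have hib : i + 1 ≤ (e1 :: t').length := by simpa using hb
        have hIH := ih m (by simp) hc
        rw [hl] at hIH ⊢
        dsimp only at hIH ⊢
        have hsl : PySem.List.slice (e :: e1 :: t') (some (-(i : Int) - 1)) none
            = PySem.List.slice (e1 :: t') (some (-(i : Int) - 1)) none := by
          rw [slice_neg_succ, slice_neg_succ]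
          have h1 : (e :: e1 :: t').length - (i + 1) = ((e1 :: t').length - (i + 1)) + 1 := by
            simp at hib ⊢; omega
          rw [h1, List.drop_succ_cons]
        rw [hsl, hIH]
        conv_rhs => rw [pvB_drop]
        have hps : pvSum (e :: e1 :: t') = (e.length : Int) + pvSum (e1 :: t') := pvSum_cons _ _
        have hcond : m ≤ pvSum (e :: e1 :: t') - (e.length : Int) := by omega
        rw [if_pos hcond]
        have harg : pvSum (e :: e1 :: t') - (e.length : Int) = pvSum (e1 :: t') := by omega
        rw [harg]
      · -- cutoff lands on e itself: whole list kept, e trimmed in front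
        rw [loop_none (e1 :: t').reverse 0 0 m (by rw [pvSum_reverse]; omega)]
        simp only [pvSum_cons] at hm
        have hps : pvSum (e1 :: t') = (e1.length : Int) + pvSum t' := pvSum_cons _ _
        have hc2 : m ≤ 0 + pvSum (e1 :: t').reverse + (e.length : Int) := by
          rw [pvSum_reverse]; omega
        simp only [pvA_loop, hc2, if_true]
        rw [slice_neg_succ]
        have hd : (e :: e1 :: t').length - ((0 + (e1 :: t').reverse.length) + 1) = 0 := by simp
        rw [hd, List.drop_zero]
        simp only [pvB_drop, pvSum_cons]
        have hc3 : ¬ m ≤ (e.length : Int) + ((e1.length : Int) + pvSum t') - (e.length : Int) := by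
          omega
        rw [if_neg hc3]
        have harg : 0 + pvSum (e1 :: t').reverse + (e.length : Int) - m
            = (e.length : Int) + ((e1.length : Int) + pvSum t') - m := by
          rw [pvSum_reverse, pvSum_cons]; ring
        rw [harg]

-- ===== VERDICT (by name: the statement is the Claim_ definition above) =====
theorem limit_num_transitions_spec : Claim_equal_limit_num_transitions := by
  intro episodes m _dom hpre
  obtain ⟨hne, _hm⟩ := hpre
  unfold Spec_limit_num_transitions limit_num_transitions limit_num_transitions_alt
  have htot : (episodes.map (fun ep => (ep.length : Int))).sum = pvSum episodes := rfl
  rw [htot]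
  by_cases hlt : pvSum episodes < m
  · rw [loop_none episodes.reverse 0 0 m (by rw [pvSum_reverse]; omega)]
    simp [hlt]
  · rw [if_neg hlt]
    exact key episodes m hne (by omega)
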